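-- pv_equiv track=rewrite | github.com/malleswar0511/Leetcodes-problems | nearest_smallest_subnumber.py | nearest_subnumbers
-- ===== SOURCE A (Python) =====
-- def nearest_subnumbers(n1:int,n2:int)->int:
--     subnumbers = []
--     s = str(n1)
--     # Generate all possible contiguous subnumbers
--     for i in range(len(s)):
--         for j in range(i+1,len(s)+1):
--             subnumbers.append(int(s[i:j]))
--     # First, filter subnumbers that are >= n2
--     larger_or_equal = [x for x in subnumbers if x >= n2]
--
--     if larger_or_equal:
--         # Pick the one with smallest difference among larger ones
--         return min(larger_or_equal, key=lambda x: abs(x - n2))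
--     else:
--         # If no larger subnumber exists, fallback to closest smaller
--         return min(subnumbers, key=lambda x: abs(x - n2))
-- ===== SOURCE B (Python) =====
-- def nearest_subnumbers(n1: int, n2: int) -> int:
--     # Order-statistics reformulation: among candidates >= n2 the smallest VALUE is
--     # the nearest, and when none exists every candidate is < n2, so the nearest is
--     # the largest VALUE.  No distances are computed; substrings are enumerated by
--     # end position, longest end first, start ascending -- order is irrelevant
--     # because the answer depends only on which values occur.
--     s = str(n1)
--     up = None    # smallest substring value that is >= n2
--     top = None   # largest substring value overall
--     for j in range(len(s), 0, -1):
--         for i in range(j):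
--             x = int(s[i:j])
--             if x >= n2 and (up is None or x < up):
--                 up = x
--             if top is None or x > top:
--                 top = x
--     return up if up is not None else top
-- ===== Notes on version B (the rewrite author's own statement) =====
-- stated objective: alternative
-- what changed: B replaces A's nearest-by-distance selection (build list, filter >= n2, two min(key=abs(x-n2)) calls) with pure order statistics justified by a proved reduction: among candidates >= n2 the nearest is simply the smallest value, and when none exists all candidates are < n2 so the nearest is the largest value; B keeps these two scalar extrema in one pass over the substrings, enumerated in a different order (end position outer, counting down) since the result depends only on which values occur, computing no distance at all.
import Mathlib
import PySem

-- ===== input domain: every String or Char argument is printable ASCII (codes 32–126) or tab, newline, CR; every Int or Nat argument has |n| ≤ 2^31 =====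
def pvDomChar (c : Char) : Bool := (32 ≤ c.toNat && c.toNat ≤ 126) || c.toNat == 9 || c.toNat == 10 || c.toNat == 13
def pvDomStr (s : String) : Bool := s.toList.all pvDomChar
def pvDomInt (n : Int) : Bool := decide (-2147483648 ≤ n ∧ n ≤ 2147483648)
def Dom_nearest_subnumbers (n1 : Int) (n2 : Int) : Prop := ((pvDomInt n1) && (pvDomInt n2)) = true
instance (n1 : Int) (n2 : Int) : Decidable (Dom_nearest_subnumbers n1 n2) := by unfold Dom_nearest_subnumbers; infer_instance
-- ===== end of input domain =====

-- B selects by order statistics (smallest candidate ≥ n2, else largest candidate) instead of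
-- A's distance minimisation; equal on Pre_ (n1 ≥ 0).

-- ===== PORT A =====
-- int(s[i:j]): '.getD 0' is never reached under Pre_ (n1 ≥ 0 ⇒ every substring of str(n1) is digits);
-- for n1 < 0 the substring '-' raises ValueError in Python, excluded by Pre_.
def nearest_subnumbers (n1 : Int) (n2 : Int) : Int :=
  let s := PySem.Int.toStr n1
  let subnumbers :=
    (PySem.List.pyRange 0 (PySem.Str.len s) 1).foldl (fun acc i =>
      (PySem.List.pyRange (i + 1) (PySem.Str.len s + 1) 1).foldl (fun acc2 j =>
        acc2 ++ [(PySem.Int.ofStr? (PySem.Str.slice s (some i) (some j))).getD 0]) acc) []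
  let larger_or_equal := subnumbers.filter (fun x => decide (n2 ≤ x))
  if larger_or_equal ≠ [] then
    (PySem.List.min? larger_or_equal (fun x => |x - n2|)).getD 0
  else
    (PySem.List.min? subnumbers (fun x => |x - n2|)).getD 0

-- ===== PORT B =====
-- state = (up, top); 'up = None'/'top = None' are the 'none' cases; the final '.getD 0'
-- mirrors 'return top' (top is never None since str(n1) is nonempty)
def nearest_subnumbers_alt (n1 : Int) (n2 : Int) : Int :=
  let s := PySem.Int.toStr n1
  let st :=
    (PySem.List.pyRange (PySem.Str.len s) 0 (-1)).foldl (fun st j =>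
      (PySem.List.pyRange 0 j 1).foldl (fun st i =>
        let x := (PySem.Int.ofStr? (PySem.Str.slice s (some i) (some j))).getD 0
        let up :=
          if n2 ≤ x then
            match st.1 with
            | none => some x
            | some m => if x < m then some x else some m
          else st.1
        let top :=
          match st.2 with
          | none => some x
          | some m => if m < x then some x else some m
        (up, top)) st)
      ((none, none) : Option Int × Option Int)
  match st.1 with
  | some v => v
  | none => st.2.getD 0

-- ===== PRECONDITION & SPEC =====
-- Pre_ excludes exactly n1 < 0: there str(n1) starts with '-' and int('-') raises ValueError in A (and in B).
def Pre_nearest_subnumbers (n1 : Int) (n2 : Int) : Prop := 0 ≤ n1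
instance (n1 : Int) (n2 : Int) : Decidable (Pre_nearest_subnumbers n1 n2) := by unfold Pre_nearest_subnumbers; infer_instance
def pvWitness_nearest_subnumbers : Int × Int := (123, 5)

def Spec_nearest_subnumbers (n1 : Int) (n2 : Int) (out : Int) : Prop := out = nearest_subnumbers_alt n1 n2
instance (n1 : Int) (n2 : Int) (out : Int) : Decidable (Spec_nearest_subnumbers n1 n2 out) := by unfold Spec_nearest_subnumbers; infer_instance

-- ===== CLAIM (what is proved, stated in full; the proofs are below) =====
def Claim_equal_nearest_subnumbers : Prop := ∀ (n1 : Int) (n2 : Int), Dom_nearest_subnumbers n1 n2 → Pre_nearest_subnumbers n1 n2 → Spec_nearest_subnumbers n1 n2 (nearest_subnumbers n1 n2)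

-- ===== LEMMAS AND PROOFS =====

-- A's running-min-by-key step (exactly PySem.List.min?'s fold step) and B's two scalar steps
def pvUpd (key : Int → Int) (acc : Option Int) (x : Int) : Option Int :=
  match acc with
  | none => some x
  | some m => if key x < key m then some x else some m

def pvMin (acc : Option Int) (x : Int) : Option Int :=
  match acc with
  | none => some x
  | some m => if x < m then some x else some m

def pvMax (acc : Option Int) (x : Int) : Option Int :=
  match acc with
  | none => some x
  | some m => if m < x then some x else some m

theorem pv_min?_eq_foldl (l : List Int) (key : Int → Int) :
    PySem.List.min? l key = l.foldl (pvUpd key) none := by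
  unfold PySem.List.min?
  apply PySem.List.foldl_congr_mem
  intro acc x _
  cases acc <;> rfl

theorem pv_foldl_flatMap {α β γ : Type} (l : List α) (g : α → List β) (f : γ → β → γ) (init : γ) :
    (l.flatMap g).foldl f init = l.foldl (fun acc i => (g i).foldl f acc) init := by
  induction l generalizing init with
  | nil => rfl
  | cons a t ih => simp [List.flatMap_cons, List.foldl_append, ih]

-- B's pair fold splits into a running min over the ≥ n2 candidates and a running max over all
theorem pv_pair_fold (n2 : Int) (L : List Int) (u t : Option Int) :
    L.foldl (fun st x =>
      (if n2 ≤ x then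
         match st.1 with
         | none => some x
         | some m => if x < m then some x else some m
       else st.1,
       match st.2 with
       | none => some x
       | some m => if m < x then some x else some m)) (u, t)
    = ((L.filter (fun x => decide (n2 ≤ x))).foldl pvMin u, L.foldl pvMax t) := by
  induction L generalizing u t with
  | nil => rfl
  | cons x l ih =>
    simp only [List.foldl_cons, List.filter_cons]
    by_cases h : n2 ≤ x <;> simp [h, ih, pvMin, pvMax]

-- the scalar folds compute List.min? / List.max?
theorem pv_foldl_pvMin_some (l : List Int) (a : Int) :
    l.foldl pvMin (some a) = some (l.foldl min a) := by
  induction l generalizing a with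
  | nil => rfl
  | cons x t ih =>
    simp only [List.foldl_cons, pvMin]
    by_cases h : x < a
    · rw [if_pos h, ih]
      congr 1
      simp [min_def, not_le.mpr h]
    · rw [if_neg h, ih]
      congr 1
      simp [not_lt.mp h]

theorem pv_foldl_pvMin (l : List Int) : l.foldl pvMin none = l.min? := by
  cases l with
  | nil => rfl
  | cons a t => simpa [pvMin, List.min?] using pv_foldl_pvMin_some t a

theorem pv_foldl_pvMax_some (l : List Int) (a : Int) :
    l.foldl pvMax (some a) = some (l.foldl max a) := by
  induction l generalizing a with
  | nil => rfl
  | cons x t ih =>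
    simp only [List.foldl_cons, pvMax]
    by_cases h : a < x
    · rw [if_pos h, ih]
      congr 1
      simp [le_of_lt h]
    · rw [if_neg h, ih]
      congr 1
      simp [not_lt.mp h]

theorem pv_foldl_pvMax (l : List Int) : l.foldl pvMax none = l.max? := by
  cases l with
  | nil => rfl
  | cons a t => simpa [pvMax, List.max?] using pv_foldl_pvMax_some t a

-- on a list of candidates all ≥ n2, A's min-by-|x−n2| fold is B's running min
theorem pv_upd_eq_min (n2 : Int) (l : List Int) (h : ∀ x ∈ l, n2 ≤ x) :
    ∀ acc : Option Int, (∀ m, acc = some m → n2 ≤ m) →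
      l.foldl (pvUpd (fun x => |x - n2|)) acc = l.foldl pvMin acc := by
  induction l with
  | nil => intro acc _; rfl
  | cons x t ih =>
    intro acc hacc
    have hx : n2 ≤ x := h x (by simp)
    have ht : ∀ y ∈ t, n2 ≤ y := fun y hy => h y (by simp [hy])
    cases acc with
    | none => exact ih ht (some x) (by intro m hm; cases hm; exact hx)
    | some m =>
      have hm : n2 ≤ m := hacc m rfl
      have hiff : |x - n2| < |m - n2| ↔ x < m := by
        rw [abs_of_nonneg (by omega), abs_of_nonneg (by omega)]; omega
      simp only [List.foldl_cons, pvUpd, pvMin]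
      by_cases hlt : x < m
      · rw [if_pos (hiff.mpr hlt), if_pos hlt]
        exact ih ht (some x) (by intro k hk; cases hk; exact hx)
      · rw [if_neg (fun c => hlt (hiff.mp c)), if_neg hlt]
        exact ih ht (some m) (by intro k hk; cases hk; exact hm)

-- on a list of candidates all < n2, A's min-by-|x−n2| fold is B's running max
theorem pv_upd_eq_max (n2 : Int) (l : List Int) (h : ∀ x ∈ l, ¬ n2 ≤ x) :
    ∀ acc : Option Int, (∀ m, acc = some m → ¬ n2 ≤ m) →
      l.foldl (pvUpd (fun x => |x - n2|)) acc = l.foldl pvMax acc := by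
  induction l with
  | nil => intro acc _; rfl
  | cons x t ih =>
    intro acc hacc
    have hx : ¬ n2 ≤ x := h x (by simp)
    have ht : ∀ y ∈ t, ¬ n2 ≤ y := fun y hy => h y (by simp [hy])
    cases acc with
    | none => exact ih ht (some x) (by intro m hm; cases hm; exact hx)
    | some m =>
      have hm : ¬ n2 ≤ m := hacc m rfl
      have hiff : |x - n2| < |m - n2| ↔ m < x := by
        rw [abs_of_neg (by omega), abs_of_neg (by omega)]; omega
      simp only [List.foldl_cons, pvUpd, pvMax]
      by_cases hlt : m < x
      · rw [if_pos (hiff.mpr hlt), if_pos hlt]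
        exact ih ht (some x) (by intro k hk; cases hk; exact hx)
      · rw [if_neg (fun c => hlt (hiff.mp c)), if_neg hlt]
        exact ih ht (some m) (by intro k hk; cases hk; exact hm)

-- min?/max? depend only on which values occur
theorem pv_min?_congr (l₁ l₂ : List Int) (h : ∀ x, x ∈ l₁ ↔ x ∈ l₂) :
    l₁.min? = l₂.min? := by
  cases hm : l₁.min? with
  | none =>
    rw [List.min?_eq_none_iff] at hm
    symm; rw [List.min?_eq_none_iff, List.eq_nil_iff_forall_not_mem]
    intro x hx; rw [← h] at hx; simp [hm] at hx
  | some a =>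
    rw [List.min?_eq_some_iff] at hm
    symm; rw [List.min?_eq_some_iff]
    exact ⟨(h a).mp hm.1, fun b hb => hm.2 b ((h b).mpr hb)⟩

theorem pv_max?_congr (l₁ l₂ : List Int) (h : ∀ x, x ∈ l₁ ↔ x ∈ l₂) :
    l₁.max? = l₂.max? := by
  cases hm : l₁.max? with
  | none =>
    rw [List.max?_eq_none_iff] at hm
    symm; rw [List.max?_eq_none_iff, List.eq_nil_iff_forall_not_mem]
    intro x hx; rw [← h] at hx; simp [hm] at hx
  | some a =>
    rw [List.max?_eq_some_iff] at hm
    symm; rw [List.max?_eq_some_iff]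
    exact ⟨(h a).mp hm.1, fun b hb => hm.2 b ((h b).mpr hb)⟩

-- A's (i ascending, j ascending) and B's (j descending, i ascending) enumerations produce the same values
theorem pv_mem_iff (n : Int) (v : Int → Int → Int) (x : Int) :
    x ∈ (PySem.List.pyRange 0 n 1).flatMap (fun i => (PySem.List.pyRange (i + 1) (n + 1) 1).map (v i))
    ↔ x ∈ (PySem.List.pyRange n 0 (-1)).flatMap (fun j => (PySem.List.pyRange 0 j 1).map (fun i => v i j)) := by
  simp only [List.mem_flatMap, List.mem_map, PySem.List.mem_pyRange_one, PySem.List.mem_pyRange_neg_one]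
  constructor
  · rintro ⟨i, ⟨h1, h2⟩, j, ⟨h3, h4⟩, h5⟩
    exact ⟨j, ⟨by omega, by omega⟩, i, ⟨by omega, by omega⟩, h5⟩
  · rintro ⟨j, ⟨h1, h2⟩, i, ⟨h3, h4⟩, h5⟩
    exact ⟨i, ⟨by omega, by omega⟩, j, ⟨by omega, by omega⟩, h5⟩

-- the generic equivalence, for any candidate generator v over the two index orders
theorem pv_generic (n2 n : Int) (v : Int → Int → Int) :
    (let subnumbers := (PySem.List.pyRange 0 n 1).foldl (fun acc i =>
        (PySem.List.pyRange (i + 1) (n + 1) 1).foldl (fun acc2 j => acc2 ++ [v i j]) acc) ([] : List Int)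
     let larger_or_equal := subnumbers.filter (fun x => decide (n2 ≤ x))
     if larger_or_equal ≠ [] then
       (PySem.List.min? larger_or_equal (fun x => |x - n2|)).getD 0
     else
       (PySem.List.min? subnumbers (fun x => |x - n2|)).getD 0)
    =
    (let st := (PySem.List.pyRange n 0 (-1)).foldl (fun st j =>
        (PySem.List.pyRange 0 j 1).foldl (fun st i =>
          let x := v i j
          let up :=
            if n2 ≤ x then
              match st.1 with
              | none => some x
              | some m => if x < m then some x else some m
            else st.1
          let top :=
            match st.2 with
            | none => some x
            | some m => if m < x then some x else some m
          (up, top)) st) ((none, none) : Option Int × Option Int)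
     match st.1 with
     | some w => w
     | none => st.2.getD 0) := by
  have hA : (PySem.List.pyRange 0 n 1).foldl (fun acc i =>
      (PySem.List.pyRange (i + 1) (n + 1) 1).foldl (fun acc2 j => acc2 ++ [v i j]) acc) ([] : List Int)
      = (PySem.List.pyRange 0 n 1).flatMap (fun i => (PySem.List.pyRange (i + 1) (n + 1) 1).map (v i)) := by
    simp only [PySem.List.foldl_append_singleton_eq_map,
      PySem.List.foldl_append_eq_flatMap, List.nil_append]
  set LA := (PySem.List.pyRange 0 n 1).flatMap (fun i => (PySem.List.pyRange (i + 1) (n + 1) 1).map (v i)) with hLA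
  set LB := (PySem.List.pyRange n 0 (-1)).flatMap (fun j => (PySem.List.pyRange 0 j 1).map (fun i => v i j)) with hLB
  have hB : (PySem.List.pyRange n 0 (-1)).foldl (fun st j =>
        (PySem.List.pyRange 0 j 1).foldl (fun st i =>
          let x := v i j
          let up :=
            if n2 ≤ x then
              match st.1 with
              | none => some x
              | some m => if x < m then some x else some m
            else st.1
          let top :=
            match st.2 with
            | none => some x
            | some m => if m < x then some x else some m
          (up, top)) st) ((none, none) : Option Int × Option Int)
      = ((LB.filter (fun x => decide (n2 ≤ x))).min?, LB.max?) := by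
    rw [hLB, ← pv_foldl_pvMin, ← pv_foldl_pvMax, ← pv_pair_fold n2 LB none none, hLB,
      pv_foldl_flatMap]
    simp only [List.foldl_map]
  have hmem : ∀ x, x ∈ LA ↔ x ∈ LB := pv_mem_iff n v
  have hmemF : ∀ x, x ∈ LA.filter (fun x => decide (n2 ≤ x)) ↔ x ∈ LB.filter (fun x => decide (n2 ≤ x)) := by
    intro x; simp only [List.mem_filter, hmem]
  simp only [hA, hB]
  rw [← pv_min?_congr _ _ hmemF, ← pv_max?_congr _ _ hmem]
  by_cases hF : LA.filter (fun x => decide (n2 ≤ x)) = []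
  · -- no candidate ≥ n2: A falls back to min-by-distance over all (= the max), B's up is none
    have hall : ∀ x ∈ LA, ¬ n2 ≤ x := by
      intro x hx hge
      have : x ∈ LA.filter (fun x => decide (n2 ≤ x)) := by
        simp [List.mem_filter, hx, hge]
      simp [hF] at this
    have hnone : (LA.filter (fun x => decide (n2 ≤ x))).min? = none := by
      rw [List.min?_eq_none_iff]; exact hF
    rw [if_neg (by simp [hF])]
    simp only [hnone]
    rw [pv_min?_eq_foldl, pv_upd_eq_max n2 LA hall none (by intro m hm; cases hm),
      pv_foldl_pvMax]
  · -- some candidate ≥ n2: A's min-by-distance over them is their minimum value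
    have hge : ∀ x ∈ LA.filter (fun x => decide (n2 ≤ x)), n2 ≤ x := by
      intro x hx
      have := List.of_mem_filter hx
      simpa using this
    obtain ⟨a, ha⟩ : ∃ a, (LA.filter (fun x => decide (n2 ≤ x))).min? = some a := by
      cases hm : (LA.filter (fun x => decide (n2 ≤ x))).min? with
      | none => exact absurd (List.min?_eq_none_iff.mp hm) hF
      | some a => exact ⟨a, rfl⟩
    rw [if_pos hF]
    simp only [ha]
    rw [pv_min?_eq_foldl,
      pv_upd_eq_min n2 _ hge none (by intro m hm; cases hm),
      pv_foldl_pvMin, ha]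
    rfl

-- ===== VERDICT (by name: the statement is the Claim_ definition above) =====
theorem nearest_subnumbers_spec : Claim_equal_nearest_subnumbers := by
  intro n1 n2 _ _
  unfold Spec_nearest_subnumbers nearest_subnumbers nearest_subnumbers_alt
  exact pv_generic n2 (PySem.Str.len (PySem.Int.toStr n1))
    (fun i j => (PySem.Int.ofStr? (PySem.Str.slice (PySem.Int.toStr n1) (some i) (some j))).getD 0)
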